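-- pv_equiv track=rewrite | github.com/Juan171109/SmartAPITester | apitesting1.py | parse_test_cases
-- ===== SOURCE A (Python) =====
-- def parse_test_cases(test_cases_str):
--     test_cases = []
--     current_test = {}
--     for line in test_cases_str.split('\n'):
--         line = line.strip()
--         if line.startswith("Test case:"):
--             if current_test:
--                 test_cases.append(current_test)
--             current_test = {'name': line.split("Test case:")[1].strip()}
--         elif line.startswith("Request:"):
--             current_test['request'] = line.split("Request:")[1].strip()
--         elif line.startswith("Expected:"):
--             current_test['expected'] = line.split("Expected:")[1].strip()
--         elif line.startswith("Assertions:"):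
--             current_test['assertions'] = line.split("Assertions:")[1].strip()
--     if current_test:
--         test_cases.append(current_test)
--     return test_cases
-- ===== SOURCE B (Python) =====
-- def parse_test_cases(test_cases_str):
--     # pass 1: partition stripped lines into blocks, a new block at each "Test case:" header
--     done, cur = [], []
--     for raw in test_cases_str.split('\n'):
--         line = raw.strip()
--         if line.startswith("Test case:"):
--             done.append(cur)
--             cur = [line]
--         else:
--             cur.append(line)
--     done.append(cur)
--     # pass 2: reduce each block to a dict via a prefix->key table; keep non-empty dicts
--     fields = [("Test case:", "name"), ("Request:", "request"),
--               ("Expected:", "expected"), ("Assertions:", "assertions")]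
--     out = []
--     for block in done:
--         d = {}
--         for line in block:
--             for prefix, key in fields:
--                 if line.startswith(prefix):
--                     d[key] = line.split(prefix)[1].strip()
--                     break
--         if d:
--             out.append(d)
--     return out
-- ===== Notes on version B (the rewrite author's own statement) =====
-- stated objective: alternative
-- what changed: Replaced A's single stateful loop (one running dict flushed at each header) by a two-pass decomposition: first partition the stripped lines into blocks at each test-case header line, then reduce each block to a dict via a prefix-to-key table lookup, keeping non-empty dicts.
import Mathlib
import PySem

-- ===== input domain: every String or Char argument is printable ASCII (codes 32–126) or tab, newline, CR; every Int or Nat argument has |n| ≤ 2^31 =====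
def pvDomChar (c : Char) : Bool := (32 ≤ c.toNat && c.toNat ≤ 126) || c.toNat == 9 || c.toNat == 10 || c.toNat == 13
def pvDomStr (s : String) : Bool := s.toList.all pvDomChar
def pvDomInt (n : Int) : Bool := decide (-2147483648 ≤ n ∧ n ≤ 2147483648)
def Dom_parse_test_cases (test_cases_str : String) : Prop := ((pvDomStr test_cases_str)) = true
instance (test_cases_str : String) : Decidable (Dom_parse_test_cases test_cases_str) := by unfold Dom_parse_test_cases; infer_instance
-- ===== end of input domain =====

-- B re-decomposes A's single stateful loop into two passes (partition into blocks, then reduce each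
-- block with a prefix→key table); same return value, objective: alternative decomposition.

-- ===== PORT A =====

-- s.split(sep) for a nonempty literal sep (split? is none only for sep = "", never here)
def pvSplit (s sep : String) : List String := (PySem.Str.split? s sep).getD []

-- one step of A's for-loop: state = (test_cases so far, current_test)
def pvStepA (st : List (PySem.Dict String String) × PySem.Dict String String) (raw : String) :
    List (PySem.Dict String String) × PySem.Dict String String :=
  let line := PySem.Str.strip raw
  if PySem.Str.startswith line "Test case:" then
    ((if st.2.items.isEmpty then st.1 else st.1 ++ [st.2]),
      (PySem.Dict.empty : PySem.Dict String String).insert "name"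
        (PySem.Str.strip ((pvSplit line "Test case:").getD 1 "")))
  else if PySem.Str.startswith line "Request:" then
    (st.1, st.2.insert "request" (PySem.Str.strip ((pvSplit line "Request:").getD 1 "")))
  else if PySem.Str.startswith line "Expected:" then
    (st.1, st.2.insert "expected" (PySem.Str.strip ((pvSplit line "Expected:").getD 1 "")))
  else if PySem.Str.startswith line "Assertions:" then
    (st.1, st.2.insert "assertions" (PySem.Str.strip ((pvSplit line "Assertions:").getD 1 "")))
  else st

def parse_test_cases (test_cases_str : String) : List (List (String × String)) :=
  let st := (pvSplit test_cases_str "\n").foldl pvStepA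
    ([], (PySem.Dict.empty : PySem.Dict String String))
  (if st.2.items.isEmpty then st.1 else st.1 ++ [st.2]).map (·.items)

-- ===== PORT B =====

-- pass 1 step: partition stripped lines into blocks, new block at each header
def pvStepPart (st : List (List String) × List String) (raw : String) :
    List (List String) × List String :=
  let line := PySem.Str.strip raw
  if PySem.Str.startswith line "Test case:" then (st.1 ++ [st.2], [line])
  else (st.1, st.2 ++ [line])

def pvFields : List (String × String) :=
  [("Test case:", "name"), ("Request:", "request"),
   ("Expected:", "expected"), ("Assertions:", "assertions")]

-- inner for-with-break over the table
def pvApplyLine (d : PySem.Dict String String) (line : String) : PySem.Dict String String :=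
  match pvFields.find? (fun pk => PySem.Str.startswith line pk.1) with
  | some (pfx, key) => d.insert key (PySem.Str.strip ((pvSplit line pfx).getD 1 ""))
  | none => d

def pvReduce (block : List String) : PySem.Dict String String :=
  block.foldl pvApplyLine (PySem.Dict.empty : PySem.Dict String String)

def pvEmit (block : List String) : Option (List (String × String)) :=
  let d := pvReduce block
  if d.items.isEmpty then none else some d.items

def parse_test_cases_alt (test_cases_str : String) : List (List (String × String)) :=
  let st := (pvSplit test_cases_str "\n").foldl pvStepPart ([], [])
  (st.1 ++ [st.2]).filterMap pvEmit

-- ===== PRECONDITION & SPEC =====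
def Spec_parse_test_cases (test_cases_str : String) (out : List (List (String × String))) : Prop := out = parse_test_cases_alt test_cases_str
instance (test_cases_str : String) (out : List (List (String × String))) : Decidable (Spec_parse_test_cases test_cases_str out) := by unfold Spec_parse_test_cases; infer_instance

-- ===== CLAIM (what is proved, stated in full; the proofs are below) =====
def Claim_equal_parse_test_cases : Prop := ∀ (test_cases_str : String), Dom_parse_test_cases test_cases_str → Spec_parse_test_cases test_cases_str (parse_test_cases test_cases_str)

-- ===== LEMMAS AND PROOFS =====

-- on a non-header line, A's step is B's table lookup applied to the running dict
theorem pvStepA_nonheader (acc : List (PySem.Dict String String)) (d : PySem.Dict String String)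
    (raw : String) (h : PySem.Str.startswith (PySem.Str.strip raw) "Test case:" = false) :
    pvStepA (acc, d) raw = (acc, pvApplyLine d (PySem.Str.strip raw)) := by
  simp only [pvStepA, pvApplyLine, pvFields, List.find?, h]
  split_ifs <;> simp_all

-- on a header line, A flushes and restarts with exactly B's reduction of the new block
theorem pvStepA_header (acc : List (PySem.Dict String String)) (d : PySem.Dict String String)
    (raw : String) (h : PySem.Str.startswith (PySem.Str.strip raw) "Test case:" = true) :
    pvStepA (acc, d) raw =
      ((if d.items.isEmpty then acc else acc ++ [d]), pvReduce [PySem.Str.strip raw]) := by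
  have h' : PySem.Chars.startswith (PySem.Chars.strip raw.toList) ['T', 'e', 's', 't', ' ', 'c', 'a', 's', 'e', ':'] = true := by
    simpa using h
  simp [pvStepA, pvReduce, pvApplyLine, pvFields, List.foldl, h']

theorem pvReduce_append (b : List String) (line : String) :
    pvReduce (b ++ [line]) = pvApplyLine (pvReduce b) line := by
  simp [pvReduce]

-- finalize helpers
def pvFinA (st : List (PySem.Dict String String) × PySem.Dict String String) :
    List (List (String × String)) :=
  (if st.2.items.isEmpty then st.1 else st.1 ++ [st.2]).map (·.items)

def pvFinB (st : List (List String) × List String) : List (List (String × String)) :=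
  (st.1 ++ [st.2]).filterMap pvEmit

theorem pv_flush (acc : List (PySem.Dict String String)) (done : List (List String))
    (curb : List String) (hinv : acc.map (·.items) = done.filterMap pvEmit) :
    (if (pvReduce curb).items.isEmpty then acc else acc ++ [pvReduce curb]).map (·.items)
      = (done ++ [curb]).filterMap pvEmit := by
  rw [List.filterMap_append, ← hinv]
  by_cases h : (pvReduce curb).items.isEmpty <;> simp_all [pvEmit, List.isEmpty_iff]

theorem pv_main (ls : List String) :
    ∀ (acc : List (PySem.Dict String String)) (done : List (List String)) (curb : List String),
      acc.map (·.items) = done.filterMap pvEmit →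
      pvFinA (ls.foldl pvStepA (acc, pvReduce curb)) = pvFinB (ls.foldl pvStepPart (done, curb)) := by
  induction ls with
  | nil =>
    intro acc done curb hinv
    simpa [pvFinA, pvFinB] using pv_flush acc done curb hinv
  | cons l ls ih =>
    intro acc done curb hinv
    simp only [List.foldl_cons]
    by_cases h : PySem.Str.startswith (PySem.Str.strip l) "Test case:"
    · rw [pvStepA_header acc _ l h]
      simp only [pvStepPart, h, if_pos]
      exact ih _ _ _ (pv_flush acc done curb hinv)
    · rw [pvStepA_nonheader acc _ l (by simpa using h), ← pvReduce_append]
      simp only [pvStepPart, h, if_neg, Bool.false_eq_true, not_false_eq_true]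
      exact ih _ _ _ hinv

theorem parse_test_cases_spec : Claim_equal_parse_test_cases := by
  intro s _
  unfold Spec_parse_test_cases parse_test_cases parse_test_cases_alt
  have h := pv_main (pvSplit s "\n") [] [] []
  simp only [pvFinA, pvFinB] at h
  exact h (by simp [pvEmit, pvReduce])
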